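-- pv_equiv track=rewrite | github.com/AnishDe12020/hedera-shield | scripts/sprint-multi-repo-dashboard.py | _extract_named_block
-- ===== SOURCE A (Python) =====
-- def _extract_named_block(report_text: str, header: str) -> str:
--     lines = report_text.splitlines()
--     out: list[str] = []
--     in_block = False
--     for line in lines:
--         if in_block and line.strip() == "":
--             break
--         if in_block:
--             out.append(line)
--         elif line.strip() == header:
--             in_block = True
--     return "\n".join(out).strip()
-- ===== SOURCE B (Python) =====
-- def _extract_named_block(report_text: str, header: str) -> str:
--     lines = report_text.splitlines()
--     for i, line in enumerate(lines):
--         if line.strip() == header: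
--             block = []
--             for l in lines[i + 1:]:
--                 if l.strip() == "":
--                     break
--                 block.append(l)
--             return "\n".join(block).strip()
--     return ""
-- ===== Notes on version B (the rewrite author's own statement) =====
-- stated objective: simpler
-- what changed: Replaced the in_block flag state machine with a find-then-collect decomposition: an early-return scan locates the header line, then a separate loop collects the following lines up to the first blank.
import Mathlib
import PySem

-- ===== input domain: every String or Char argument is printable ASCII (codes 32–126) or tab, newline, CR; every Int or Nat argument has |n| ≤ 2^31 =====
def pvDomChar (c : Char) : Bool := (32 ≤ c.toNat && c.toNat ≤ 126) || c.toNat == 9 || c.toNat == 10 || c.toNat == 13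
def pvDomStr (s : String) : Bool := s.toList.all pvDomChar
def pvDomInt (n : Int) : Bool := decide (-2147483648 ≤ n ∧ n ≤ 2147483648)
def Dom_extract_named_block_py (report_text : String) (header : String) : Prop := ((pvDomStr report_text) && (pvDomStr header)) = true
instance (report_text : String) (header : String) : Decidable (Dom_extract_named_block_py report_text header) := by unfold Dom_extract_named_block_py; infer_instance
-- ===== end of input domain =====

-- B replaces A's in_block flag state machine by a find-then-collect decomposition (objective: simpler).

-- ===== PORT A =====
-- A's single loop: state = (out, in_block); 'break' = returning out.
def pvLoopA (header : String) : List String → List String → Bool → List String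
  | [], out, _ => out
  | l :: ls, out, inb =>
    if inb && (PySem.Str.strip l == "") then out
    else if inb then pvLoopA header ls (out ++ [l]) true
    else if PySem.Str.strip l == header then pvLoopA header ls out true
    else pvLoopA header ls out false

def extract_named_block_py (report_text : String) (header : String) : String :=
  PySem.Str.strip (PySem.Str.join "\n" (pvLoopA header (PySem.Str.splitlines report_text) [] false))

-- ===== PORT B =====
-- B's inner collect loop ('for l in lines[i+1:]: break on blank'), over the suffix after the header line.
def pvCollectB : List String → List String
  | [] => []
  | l :: ls => if PySem.Str.strip l == "" then [] else l :: pvCollectB ls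

-- B's outer find loop with early return; the tail ls is lines[i+1:].
def pvFindB (header : String) : List String → String
  | [] => ""
  | l :: ls =>
    if PySem.Str.strip l == header then
      PySem.Str.strip (PySem.Str.join "\n" (pvCollectB ls))
    else pvFindB header ls

def extract_named_block_py_alt (report_text : String) (header : String) : String :=
  pvFindB header (PySem.Str.splitlines report_text)

-- ===== PRECONDITION & SPEC =====
def Spec_extract_named_block_py (report_text : String) (header : String) (out : String) : Prop := out = extract_named_block_py_alt report_text header
instance (report_text : String) (header : String) (out : String) : Decidable (Spec_extract_named_block_py report_text header out) := by unfold Spec_extract_named_block_py; infer_instance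

-- ===== CLAIM (what is proved, stated in full; the proofs are below) =====
def Claim_equal_extract_named_block_py : Prop := ∀ (report_text : String) (header : String), Dom_extract_named_block_py report_text header → Spec_extract_named_block_py report_text header (extract_named_block_py report_text header)

-- ===== LEMMAS AND PROOFS =====

-- Once in_block, A's loop appends exactly the lines up to the first blank one.
theorem pvLoopA_true (header : String) (ls out : List String) :
    pvLoopA header ls out true = out ++ pvCollectB ls := by
  induction ls generalizing out with
  | nil => simp [pvLoopA, pvCollectB]
  | cons l ls ih =>
    by_cases h : PySem.Str.strip l == ""
    · simp [pvLoopA, pvCollectB, h]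
    · simp only [pvLoopA, pvCollectB, h]
      simp [ih]

theorem pvLoopA_false_eq (header : String) (ls : List String) :
    PySem.Str.strip (PySem.Str.join "\n" (pvLoopA header ls [] false)) = pvFindB header ls := by
  induction ls with
  | nil => simp [pvLoopA, pvFindB, PySem.Str.join, PySem.Chars.join, PySem.Str.strip, List.intercalate, PySem.Chars.strip, PySem.Chars.lstrip, PySem.Chars.rstrip]
  | cons l ls ih =>
    by_cases h : PySem.Str.strip l == header
    · simp [pvLoopA, pvFindB, h, pvLoopA_true]
    · simp [pvLoopA, pvFindB, h, ih]

-- ===== VERDICT (by name: the statement is the Claim_ definition above) =====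
theorem extract_named_block_py_spec : Claim_equal_extract_named_block_py := by
  intro report_text header _
  unfold Spec_extract_named_block_py extract_named_block_py extract_named_block_py_alt
  exact pvLoopA_false_eq header (PySem.Str.splitlines report_text)
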